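-- pv_equiv track=rewrite | github.com/ParkerCase/KiHealth | pubmed-literature-mining/scripts/process_monitoring_articles.py | _is_usable_with_justification
-- ===== SOURCE A (Python) =====
-- from typing import List, Dict
--
-- def _is_usable_with_justification(assessment: Dict) -> bool:
--     """Check if article is usable with justification"""
--     if not assessment:
--         return False
--
--     domain_1 = (assessment.get("domain_1_participants", "") or "").lower()
--     domain_2 = (assessment.get("domain_2_predictors", "") or "").lower()
--     domain_3 = (assessment.get("domain_3_outcome", "") or "").lower()
--     domain_4 = (assessment.get("domain_4_analysis", "") or "").lower()
--
--     domains = [domain_1, domain_2, domain_3, domain_4]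
--     low_count = sum(1 for d in domains if d == "low")
--     moderate_count = sum(1 for d in domains if d == "moderate")
--     high_count = sum(1 for d in domains if d == "high")
--
--     # All Low = Usable
--     if low_count == 4:
--         return True
--
--     # 3 Low + 1 Moderate = Usable
--     if low_count == 3 and moderate_count == 1:
--         return True
--
--     # 2 Low + 2 Moderate = Usable
--     if low_count == 2 and moderate_count == 2:
--         return True
--
--     # No High Risk domains
--     if high_count == 0:
--         if low_count >= 1 and moderate_count >= 3:
--             return True
--
--     return False
-- ===== SOURCE B (Python) =====
-- def _is_usable_with_justification(assessment):
--     """Check if article is usable with justification"""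
--     keys = ("domain_1_participants", "domain_2_predictors",
--             "domain_3_outcome", "domain_4_analysis")
--     domains = [(assessment.get(k, "") or "").lower() for k in keys]
--     return (all(d in ("low", "moderate") for d in domains)
--             and any(d == "low" for d in domains))
-- ===== Notes on version B (the rewrite author's own statement) =====
-- stated objective: simpler
-- what changed: Replaced A's three explicit risk-level counters and four-branch accept chain with a single closed-form predicate: every domain rating is 'low' or 'moderate' and at least one is 'low' (this also subsumes the empty-assessment guard).
import Mathlib
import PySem

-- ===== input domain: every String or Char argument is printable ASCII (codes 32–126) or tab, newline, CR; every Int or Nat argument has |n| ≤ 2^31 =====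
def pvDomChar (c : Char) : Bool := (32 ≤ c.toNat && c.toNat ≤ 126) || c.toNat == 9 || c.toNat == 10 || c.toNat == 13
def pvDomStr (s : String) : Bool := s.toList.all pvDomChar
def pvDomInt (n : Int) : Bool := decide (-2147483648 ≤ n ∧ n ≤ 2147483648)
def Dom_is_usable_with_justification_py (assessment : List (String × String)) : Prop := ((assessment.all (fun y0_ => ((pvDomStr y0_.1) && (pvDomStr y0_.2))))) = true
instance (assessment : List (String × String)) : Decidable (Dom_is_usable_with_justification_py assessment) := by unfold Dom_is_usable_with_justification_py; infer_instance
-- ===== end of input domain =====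

set_option maxHeartbeats 1000000


-- ===== PORT A =====
-- B replaces A's three-count branch chain by a single all/any predicate (simpler; equivalent by case analysis).
def is_usable_with_justification_py (assessment : List (String × String)) : Bool :=
  if assessment.isEmpty then false
  else
    let domain_1 := PySem.Str.lower (PySem.Dict.getD (PySem.Dict.mk assessment) "domain_1_participants" "")
    let domain_2 := PySem.Str.lower (PySem.Dict.getD (PySem.Dict.mk assessment) "domain_2_predictors" "")
    let domain_3 := PySem.Str.lower (PySem.Dict.getD (PySem.Dict.mk assessment) "domain_3_outcome" "")
    let domain_4 := PySem.Str.lower (PySem.Dict.getD (PySem.Dict.mk assessment) "domain_4_analysis" "")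
    let domains := [domain_1, domain_2, domain_3, domain_4]
    let low_count := domains.countP (fun d => d == "low")
    let moderate_count := domains.countP (fun d => d == "moderate")
    let high_count := domains.countP (fun d => d == "high")
    if low_count == 4 then true
    else if low_count == 3 && moderate_count == 1 then true
    else if low_count == 2 && moderate_count == 2 then true
    else if high_count == 0 then
      if decide (1 ≤ low_count) && decide (3 ≤ moderate_count) then true else false
    else false

-- ===== PORT B =====
def is_usable_with_justification_py_alt (assessment : List (String × String)) : Bool :=
  let keys := ["domain_1_participants", "domain_2_predictors", "domain_3_outcome", "domain_4_analysis"]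
  let domains := keys.map (fun k => PySem.Str.lower (PySem.Dict.getD (PySem.Dict.mk assessment) k ""))
  domains.all (fun d => d == "low" || d == "moderate") && domains.any (fun d => d == "low")

-- ===== PRECONDITION & SPEC =====
def Spec_is_usable_with_justification_py (assessment : List (String × String)) (out : Bool) : Prop := out = is_usable_with_justification_py_alt assessment
instance (assessment : List (String × String)) (out : Bool) : Decidable (Spec_is_usable_with_justification_py assessment out) := by unfold Spec_is_usable_with_justification_py; infer_instance

-- ===== CLAIM (what is proved, stated in full; the proofs are below) =====
def Claim_equal_is_usable_with_justification_py : Prop := ∀ (assessment : List (String × String)), Dom_is_usable_with_justification_py assessment → Spec_is_usable_with_justification_py assessment (is_usable_with_justification_py assessment)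

-- ===== LEMMAS AND PROOFS =====
theorem pv_key (d1 d2 d3 d4 : String) :
    (let domains := [d1, d2, d3, d4]
     let low_count := domains.countP (fun d => d == "low")
     let moderate_count := domains.countP (fun d => d == "moderate")
     let high_count := domains.countP (fun d => d == "high")
     if low_count == 4 then true
     else if low_count == 3 && moderate_count == 1 then true
     else if low_count == 2 && moderate_count == 2 then true
     else if high_count == 0 then
       if decide (1 ≤ low_count) && decide (3 ≤ moderate_count) then true else false
     else false)
    = ([d1, d2, d3, d4].all (fun d => d == "low" || d == "moderate")
        && [d1, d2, d3, d4].any (fun d => d == "low")) := by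
  simp only [List.countP_cons, List.countP_nil, List.all_cons, List.all_nil, List.any_cons,
    List.any_nil]
  have hlm : ∀ s : String, s == "low" → s == "moderate" → False := by
    intro s h1 h2
    have e1 := eq_of_beq h1
    have e2 := eq_of_beq h2
    subst e1; simp at e2
  have hlh : ∀ s : String, s == "low" → s == "high" → False := by
    intro s h1 h2
    have e1 := eq_of_beq h1
    have e2 := eq_of_beq h2
    subst e1; simp at e2
  have hmh : ∀ s : String, s == "moderate" → s == "high" → False := by
    intro s h1 h2
    have e1 := eq_of_beq h1
    have e2 := eq_of_beq h2
    subst e1; simp at e2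
  cases hl1 : (d1 == "low") <;> cases hm1 : (d1 == "moderate") <;>
  cases hl2 : (d2 == "low") <;> cases hm2 : (d2 == "moderate") <;>
  cases hl3 : (d3 == "low") <;> cases hm3 : (d3 == "moderate") <;>
  cases hl4 : (d4 == "low") <;> cases hm4 : (d4 == "moderate") <;>
    first
      | exact (hlm d1 hl1 hm1).elim
      | exact (hlm d2 hl2 hm2).elim
      | exact (hlm d3 hl3 hm3).elim
      | exact (hlm d4 hl4 hm4).elim
      | (cases hh1 : (d1 == "high") <;> cases hh2 : (d2 == "high") <;>
         cases hh3 : (d3 == "high") <;> cases hh4 : (d4 == "high") <;>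
          first
            | exact (hlh d1 hl1 hh1).elim
            | exact (hlh d2 hl2 hh2).elim
            | exact (hlh d3 hl3 hh3).elim
            | exact (hlh d4 hl4 hh4).elim
            | exact (hmh d1 hm1 hh1).elim
            | exact (hmh d2 hm2 hh2).elim
            | exact (hmh d3 hm3 hh3).elim
            | exact (hmh d4 hm4 hh4).elim
            | simp [hl1, hm1, hh1, hl2, hm2, hh2, hl3, hm3, hh3, hl4, hm4, hh4])

-- ===== VERDICT (by name: the statement is the Claim_ definition above) =====
theorem is_usable_with_justification_py_spec : Claim_equal_is_usable_with_justification_py := by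
  intro assessment _
  unfold Spec_is_usable_with_justification_py is_usable_with_justification_py
    is_usable_with_justification_py_alt
  cases assessment with
  | nil => decide
  | cons p rest =>
    rw [if_neg (by simp)]
    simp only [List.map_cons, List.map_nil]
    exact pv_key _ _ _ _
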